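-- pv_equiv track=rewrite | github.com/benbardin/beatrice | beatrice.py | GeneratePossibleCasts
-- ===== SOURCE A (Python) =====
-- import copy
--
-- def ScoreCast(cast, role_actor_convenience, role_actor_skill):
--   score = 1
--   empty_cast = True  # For an empty cast, return a score of 0 later.
--   for role in cast:
--     actor = cast[role]
--     if actor is not None:
--       empty_cast = False
--       convenience = role_actor_convenience[role][actor]
--       skill = role_actor_skill[role][actor]
--       score *= convenience * skill
--   if empty_cast:
--     return 0
--   else:
--     return score
--
-- def CastHasRequiredActors(cast, required_actors):
--   for actor in required_actors:
--     if actor not in list(cast.values()):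
--       return False;
--   return True;
--
-- def NextUnfilledRole(cast):
--   empty_roles = []
--   for role in cast:
--     if cast[role] is None:
--       empty_roles.append(role)
--   if empty_roles:
--     return sorted(empty_roles)[0]
--   return None
--
-- def CopyPurgingActor(role_actor, actor):
--   role_actor_copy = copy.deepcopy(role_actor)
--   for role in role_actor_copy:
--     if actor in role_actor_copy[role]:
--       role_actor_copy[role].remove(actor)
--   return role_actor_copy
--
-- def GeneratePossibleCasts(cast,
--                           role_actor,
--                           scheduled_actors,
--                           best_score,
--                           role_actor_convenience,
--                           role_actor_skill):
--   role = NextUnfilledRole(cast)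
--   possible_casts = []
--   if role is None:
--     # Base case. Cast is full.
--     if CastHasRequiredActors(cast, scheduled_actors):
--       possible_casts.append(cast)
--       best_score = max(best_score,
--                        ScoreCast(cast, role_actor_convenience, role_actor_skill))
--   else:
--     # Inductive case. Expand the tree of possible casts.
--     actors = role_actor[role]
--     actor_convenience = role_actor_convenience[role]
--     actor_skill = role_actor_convenience[role]
--     actors.sort(
--       key=lambda actor: actor_convenience[actor] * actor_skill[actor],
--       reverse=True)
--     for actor in actors:
--       cast_copy = copy.deepcopy(cast)
--       cast_copy[role] = actor
--       if ScoreCast(cast_copy,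
--                    role_actor_convenience,
--                    role_actor_skill) < best_score:
--         continue
--       role_actor_copy = CopyPurgingActor(role_actor, actor)
--       children = GeneratePossibleCasts(cast_copy,
--                                        role_actor_copy,
--                                        scheduled_actors,
--                                        best_score,
--                                        role_actor_convenience,
--                                        role_actor_skill)
--       possible_casts.extend(children[0])
--       best_score = max(best_score, children[1])
--   return (possible_casts, best_score)
-- ===== SOURCE B (Python) =====
-- # Explicit-stack preorder DFS replacing A's recursion; one global running best score.
-- # Note: A sorts role_actor[role] in place (a caller-visible mutation); B does not mutate
-- # its arguments -- the equivalence claimed here is about the return value only.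
-- def GeneratePossibleCasts(cast,
--                           role_actor,
--                           scheduled_actors,
--                           best_score,
--                           role_actor_convenience,
--                           role_actor_skill):
--   def score(c):
--     filled = [(r, a) for r, a in c.items() if a is not None]
--     if not filled:
--       return 0
--     s = 1
--     for r, a in filled:
--       s *= role_actor_convenience[r][a] * role_actor_skill[r][a]
--     return s
--
--   def next_role(c):
--     empties = [r for r, a in c.items() if a is None]
--     return min(empties) if empties else None
--
--   def ordered(role, actors):
--     # A's quirk kept verbatim: the sort key squares convenience (skill table unused).
--     conv = role_actor_convenience[role]
--     return sorted(actors, key=lambda a: conv[a] * conv[a], reverse=True)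
--
--   def drop_first(lst, x):
--     if x in lst:
--       i = lst.index(x)
--       return lst[:i] + lst[i + 1:]
--     return list(lst)
--
--   def purge(ra, actor):
--     return {r: drop_first(lst, actor) for r, lst in ra.items()}
--
--   possible = []
--   best = best_score
--   stack = []
--
--   def visit(c, ra):
--     # handle one node: either record a full cast or push its frame
--     nonlocal best
--     r = next_role(c)
--     if r is None:
--       if all(a in c.values() for a in scheduled_actors):
--         possible.append(c)
--         best = max(best, score(c))
--     else:
--       stack.append((r, ordered(r, ra[r]), c, ra))
--
--   visit(cast, role_actor)
--   while stack:
--     role, actors, c, ra = stack.pop()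
--     if not actors:
--       continue
--     stack.append((role, actors[1:], c, ra))
--     child = dict(c)
--     child[role] = actors[0]
--     if score(child) < best:
--       continue
--     visit(child, purge(ra, actors[0]))
--   return possible, best
-- ===== Notes on version B (the rewrite author's own statement) =====
-- stated objective: alternative
-- what changed: Replaced A's recursive tree expansion with an explicit-stack preorder DFS: a while-loop pops frames of (role, untried actors, cast, remaining candidates), handles full casts inline, and threads one global monotone best score, instead of recursing per role and merging each child's (casts, best) pair.
import Mathlib
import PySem

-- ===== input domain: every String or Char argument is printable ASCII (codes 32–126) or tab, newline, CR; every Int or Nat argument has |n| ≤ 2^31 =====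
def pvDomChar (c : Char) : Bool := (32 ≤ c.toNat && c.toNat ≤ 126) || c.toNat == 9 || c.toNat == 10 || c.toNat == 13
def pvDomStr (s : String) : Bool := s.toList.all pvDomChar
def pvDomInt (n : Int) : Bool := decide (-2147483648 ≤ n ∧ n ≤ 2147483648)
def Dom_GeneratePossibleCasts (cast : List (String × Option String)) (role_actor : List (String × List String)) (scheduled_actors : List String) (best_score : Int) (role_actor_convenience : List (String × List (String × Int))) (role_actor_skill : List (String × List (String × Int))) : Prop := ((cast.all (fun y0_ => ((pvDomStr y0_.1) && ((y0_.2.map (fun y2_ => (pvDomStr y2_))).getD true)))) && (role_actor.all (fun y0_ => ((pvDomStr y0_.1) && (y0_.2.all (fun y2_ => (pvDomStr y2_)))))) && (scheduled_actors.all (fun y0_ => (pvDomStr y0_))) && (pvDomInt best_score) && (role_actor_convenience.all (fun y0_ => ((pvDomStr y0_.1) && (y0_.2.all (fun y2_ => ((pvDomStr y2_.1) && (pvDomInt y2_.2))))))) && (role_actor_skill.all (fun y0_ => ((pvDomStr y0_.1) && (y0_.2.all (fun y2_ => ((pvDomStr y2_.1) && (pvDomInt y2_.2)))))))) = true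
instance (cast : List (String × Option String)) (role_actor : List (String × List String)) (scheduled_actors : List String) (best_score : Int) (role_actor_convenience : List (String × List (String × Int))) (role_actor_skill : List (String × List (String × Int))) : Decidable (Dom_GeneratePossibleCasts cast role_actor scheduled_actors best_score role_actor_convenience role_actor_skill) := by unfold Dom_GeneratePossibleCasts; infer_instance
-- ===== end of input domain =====

-- ===== PORT A =====
-- B re-implements A's pruned recursion as an explicit-stack preorder DFS with one global
-- running best score (objective: alternative decomposition, same asymptotic cost).
-- Python A sorts role_actor[role] in place (a caller-visible mutation); the equivalence
-- claimed here is about the return value only.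

-- shared total dict-access helpers (Python d[k] / d.get): the default fires only where the
-- Python raises KeyError, which Pre_ excludes
def pvGetD {ν : Type} (d : List (String × ν)) (k : String) (v0 : ν) : ν :=
  PySem.Dict.getD (PySem.Dict.mk d) k v0
def pvInsertD {ν : Type} (d : List (String × ν)) (k : String) (v : ν) : List (String × ν) :=
  (PySem.Dict.insert (PySem.Dict.mk d) k v).items
-- t[role][actor], total form
def pvTbl2 (t : List (String × List (String × Int))) (role actor : String) : Int :=
  pvGetD (pvGetD t role []) actor 0
-- number of unfilled roles: termination instrumentation only (appears in no Python); both
-- ports' termination guards use it and the guards never fire on Pre_ (unique-key) inputs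
def pvNoneCount (c : List (String × Option String)) : Nat := c.countP (fun p => p.2 == none)

-- ScoreCast: product over filled roles, with the empty_cast flag
def scoreCastA (c : List (String × Option String))
    (conv skill : List (String × List (String × Int))) : Int :=
  let r := c.foldl (fun (st : Int × Bool) p =>
    match pvGetD c p.1 none with      -- actor = cast[role]
    | none => st
    | some actor => (st.1 * (pvTbl2 conv p.1 actor * pvTbl2 skill p.1 actor), false))
    (1, true)
  if r.2 then 0 else r.1

-- CastHasRequiredActors: Python's early `return False` folded as a sticky false
def castHasRequiredA (c : List (String × Option String)) (required : List String) : Bool :=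
  required.foldl (fun ok actor =>
    if (PySem.Dict.mk c).values.contains (some actor) then ok else false) true

-- NextUnfilledRole
def nextUnfilledRoleA (c : List (String × Option String)) : Option String :=
  let empty_roles := c.foldl (fun (acc : List String) p =>
    match pvGetD c p.1 none with
    | none => acc ++ [p.1]
    | some _ => acc) []
  (PySem.List.sorted empty_roles (fun r => r) false).head?

-- CopyPurgingActor: with a Python dict's unique keys, the key loop with in-place
-- list.remove is the entrywise removal of the first occurrence
def copyPurgingActorA (ra : List (String × List String)) (actor : String) :
    List (String × List String) :=
  ra.map (fun p => (p.1, match PySem.List.remove? p.2 actor with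
    | some l => l
    | none => p.2))

mutual
def GeneratePossibleCasts (cast : List (String × Option String)) (role_actor : List (String × List String)) (scheduled_actors : List String) (best_score : Int) (role_actor_convenience : List (String × List (String × Int))) (role_actor_skill : List (String × List (String × Int))) : (List (List (String × Option String))) × Int :=
  match nextUnfilledRoleA cast with
  | none =>
    -- base case: cast is full
    if castHasRequiredA cast scheduled_actors then
      ([cast], max best_score (scoreCastA cast role_actor_convenience role_actor_skill))
    else ([], best_score)
  | some role =>
    -- inductive case; A's key quirk kept: actor_skill is ALSO the convenience table.
    -- (A re-stores the sorted list into role_actor[role]; the role is filled from here on,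
    -- so that entry is never read again and the port does not re-store it.)
    let actors := pvGetD role_actor role []
    let actor_conv := pvGetD role_actor_convenience role []
    let sortedActors :=
      PySem.List.sorted actors (fun a => pvGetD actor_conv a 0 * pvGetD actor_conv a 0) true
    loopA sortedActors role cast role_actor scheduled_actors best_score
      role_actor_convenience role_actor_skill []
termination_by (pvNoneCount cast, 1, 0)

def loopA (actors : List String) (role : String) (cast : List (String × Option String))
    (role_actor : List (String × List String)) (sched : List String) (best : Int)
    (conv skill : List (String × List (String × Int)))
    (acc : List (List (String × Option String))) : (List (List (String × Option String))) × Int :=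
  match actors with
  | [] => (acc, best)
  | a :: rest =>
    let cast_copy := pvInsertD cast role (some a)
    if scoreCastA cast_copy conv skill < best then
      loopA rest role cast role_actor sched best conv skill acc
    else
      let ra' := copyPurgingActorA role_actor a
      if h : pvNoneCount cast_copy < pvNoneCount cast then
        let ch := GeneratePossibleCasts cast_copy ra' sched best conv skill
        loopA rest role cast role_actor sched (max best ch.2) conv skill (acc ++ ch.1)
      else  -- termination guard; never fires on unique-key (Pre_) inputs
        loopA rest role cast role_actor sched best conv skill acc
termination_by (pvNoneCount cast, 0, actors.length)
end

-- ===== PORT B =====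
def scoreB (c : List (String × Option String))
    (conv skill : List (String × List (String × Int))) : Int :=
  let filled := c.filterMap (fun p => p.2.map (fun a => (p.1, a)))
  if filled.isEmpty then 0
  else filled.foldl (fun s p => s * (pvTbl2 conv p.1 p.2 * pvTbl2 skill p.1 p.2)) 1

def castHasRequiredB (c : List (String × Option String)) (sched : List String) : Bool :=
  sched.all (fun a => (PySem.Dict.mk c).values.contains (some a))

def nextRoleB (c : List (String × Option String)) : Option String :=
  PySem.List.min? (c.filterMap (fun p => if p.2 == none then some p.1 else none)) (fun r => r)

def orderedB (conv : List (String × List (String × Int))) (role : String)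
    (actors : List String) : List String :=
  let aconv := pvGetD conv role []
  PySem.List.sorted actors (fun a => pvGetD aconv a 0 * pvGetD aconv a 0) true

def dropFirstB (l : List String) (x : String) : List String :=
  if l.contains x then
    match PySem.List.index? l x with
    | some i => PySem.List.slice l none (some (i : Int)) ++
                PySem.List.slice l (some ((i : Int) + 1)) none
    | none => l
  else l

def purgeB (ra : List (String × List String)) (actor : String) : List (String × List String) :=
  ra.map (fun p => (p.1, dropFirstB p.2 actor))

-- weight of a DFS stack: the termination measure of the machine
def frameWeightB (L : Nat)
    (f : String × List String × List (String × Option String) × List (String × List String)) : Nat :=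
  (f.2.1.length + 1) * (max L 2) ^ (pvNoneCount f.2.2.1)
def stackWeightB (L : Nat)
    (st : List (String × List String × List (String × Option String) × List (String × List String))) : Nat :=
  (st.map (frameWeightB L)).sum

theorem pvChildLt (b n n' k' : Nat) (hb : 2 <= b) (h1 : n' < n) (h2 : k' + 2 <= b) :
    (k' + 1) * b ^ n' < b ^ n := by
  have hp : 0 < b ^ (n - 1) := Nat.pow_pos (by omega)
  calc (k' + 1) * b ^ n' <= (b - 1) * b ^ n' := Nat.mul_le_mul_right _ (by omega)
    _ <= (b - 1) * b ^ (n - 1) :=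
        Nat.mul_le_mul_left _ (Nat.pow_le_pow_right (by omega) (by omega))
    _ < b * b ^ (n - 1) := by
        have h5 : b - 1 < b := by omega
        exact Nat.mul_lt_mul_of_lt_of_le h5 (le_refl _) hp
    _ = b ^ n := by
        have h6 : n - 1 + 1 = n := by omega
        rw [<- pow_succ']; rw [h6]

-- the DFS machine: pop a frame, consume its first untried actor, push the child in front
def runB (sched : List String) (conv skill : List (String × List (String × Int))) (L : Nat) :
    List (String × List String × List (String × Option String) × List (String × List String)) →
    List (List (String × Option String)) → Int → (List (List (String × Option String))) × Int
  | [], acc, best => (acc, best)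
  | (role, actors, c, ra) :: rest, acc, best =>
    match actors with
    | [] => runB sched conv skill L rest acc best
    | a :: tl =>
      let child := pvInsertD c role (some a)
      if scoreB child conv skill < best then
        runB sched conv skill L ((role, tl, c, ra) :: rest) acc best
      else
        let ra' := purgeB ra a
        match nextRoleB child with
        | none =>
          if castHasRequiredB child sched then
            runB sched conv skill L ((role, tl, c, ra) :: rest) (acc ++ [child])
              (max best (scoreB child conv skill))
          else runB sched conv skill L ((role, tl, c, ra) :: rest) acc best
        | some r' =>
          let cs := orderedB conv r' (pvGetD ra' r' [])
          if hg : pvNoneCount child < pvNoneCount c ∧ cs.length + 2 <= L then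
            runB sched conv skill L ((r', cs, child, ra') :: (role, tl, c, ra) :: rest) acc best
          else  -- termination guard; never fires on unique-key (Pre_) inputs
            runB sched conv skill L ((role, tl, c, ra) :: rest) acc best
termination_by st _ _ => stackWeightB L st
decreasing_by
  · -- pop an exhausted frame
    simp only [stackWeightB, frameWeightB, List.map_cons, List.sum_cons, List.length_cons, List.length_nil, Nat.zero_add, one_mul]
    have hp : 0 < (max L 2) ^ (pvNoneCount c) := Nat.pow_pos (by omega)
    omega
  · -- pruned child
    simp only [stackWeightB, frameWeightB, List.map_cons, List.sum_cons, List.length_cons, List.length_nil, Nat.zero_add, one_mul]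
    have hp : 0 < (max L 2) ^ (pvNoneCount c) := Nat.pow_pos (by omega)
    have he : (tl.length + 1 + 1) * (max L 2) ^ (pvNoneCount c)
        = (tl.length + 1) * (max L 2) ^ (pvNoneCount c) + (max L 2) ^ (pvNoneCount c) := by ring
    omega
  · -- base-case child recorded
    simp only [stackWeightB, frameWeightB, List.map_cons, List.sum_cons, List.length_cons, List.length_nil, Nat.zero_add, one_mul]
    have hp : 0 < (max L 2) ^ (pvNoneCount c) := Nat.pow_pos (by omega)
    have he : (tl.length + 1 + 1) * (max L 2) ^ (pvNoneCount c)
        = (tl.length + 1) * (max L 2) ^ (pvNoneCount c) + (max L 2) ^ (pvNoneCount c) := by ring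
    omega
  · -- base-case child not recorded
    simp only [stackWeightB, frameWeightB, List.map_cons, List.sum_cons, List.length_cons, List.length_nil, Nat.zero_add, one_mul]
    have hp : 0 < (max L 2) ^ (pvNoneCount c) := Nat.pow_pos (by omega)
    have he : (tl.length + 1 + 1) * (max L 2) ^ (pvNoneCount c)
        = (tl.length + 1) * (max L 2) ^ (pvNoneCount c) + (max L 2) ^ (pvNoneCount c) := by ring
    omega
  · -- push the child frame
    simp only [stackWeightB, frameWeightB, List.map_cons, List.sum_cons, List.length_cons,
      List.length_nil, Nat.zero_add, one_mul]
    have he : (tl.length + 1 + 1) * (max L 2) ^ (pvNoneCount c)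
        = (tl.length + 1) * (max L 2) ^ (pvNoneCount c) + (max L 2) ^ (pvNoneCount c) := by ring
    have h3 : ((orderedB conv r' (pvGetD (purgeB ra a) r' [])).length + 1) *
        (max L 2) ^ (pvNoneCount (pvInsertD c role (some a))) < (max L 2) ^ (pvNoneCount c) :=
      pvChildLt (max L 2) (pvNoneCount c) _ _ (by omega) hg.1
        (le_trans hg.2 (Nat.le_max_left L 2))
    omega
  · -- guarded skip
    simp only [stackWeightB, frameWeightB, List.map_cons, List.sum_cons, List.length_cons, List.length_nil, Nat.zero_add, one_mul]
    have hp : 0 < (max L 2) ^ (pvNoneCount c) := Nat.pow_pos (by omega)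
    have he : (tl.length + 1 + 1) * (max L 2) ^ (pvNoneCount c)
        = (tl.length + 1) * (max L 2) ^ (pvNoneCount c) + (max L 2) ^ (pvNoneCount c) := by ring
    omega

def GeneratePossibleCasts_alt (cast : List (String × Option String)) (role_actor : List (String × List String)) (scheduled_actors : List String) (best_score : Int) (role_actor_convenience : List (String × List (String × Int))) (role_actor_skill : List (String × List (String × Int))) : (List (List (String × Option String))) × Int :=
  let L := (role_actor.foldl (fun m p => max m p.2.length) 0) + 2
  match nextRoleB cast with
  | none =>
    if castHasRequiredB cast scheduled_actors then
      ([cast], max best_score (scoreB cast role_actor_convenience role_actor_skill))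
    else ([], best_score)
  | some r =>
    runB scheduled_actors role_actor_convenience role_actor_skill L
      [(r, orderedB role_actor_convenience r (pvGetD role_actor r []), cast, role_actor)]
      [] best_score

-- ===== PRECONDITION & SPEC =====
-- code-point lexicographic ≤ on strings (= Python's ≤ on the ASCII domain), kernel-reducible
def pvLeChars : List Char → List Char → Bool
  | [], _ => true
  | _ :: _, [] => false
  | a :: as, b :: bs =>
    if a.toNat < b.toNat then true
    else if b.toNat < a.toNat then false
    else pvLeChars as bs

def pvStrLe (s t : String) : Bool := pvLeChars s.toList t.toList

-- every actor of `acts` has a convenience and a skill entry for `role`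
def pvScorable (rc rs : List (String × List (String × Int))) (role : String)
    (acts : List String) : Bool :=
  acts.all (fun a => ((pvGetD rc role []).map Prod.fst).contains a &&
                     ((pvGetD rs role []).map Prod.fst).contains a)

-- A's KeyError-free domain, approximated from the input shape alone (no simulation):
--  * if the cast is already full, the score tables are needed exactly when the
--    required-actor check passes (exact);
--  * if some role is unfilled, A reads role_actor and role_actor_convenience at the
--    smallest such role before anything else (exact); if that candidate list is empty A
--    returns immediately and nothing more is needed (exact); otherwise the search may
--    descend, and Pre_ requires the tables to be complete for every role it could fill.
def pvPreChk (cast : List (String × Option String)) (role_actor : List (String × List String))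
    (scheduled_actors : List String) (rc rs : List (String × List (String × Int))) : Bool :=
  decide (role_actor.map Prod.fst).Nodup &&
  decide (rc.map Prod.fst).Nodup &&
  decide (rs.map Prod.fst).Nodup &&
  rc.all (fun p => decide (p.2.map Prod.fst).Nodup) &&
  rs.all (fun p => decide (p.2.map Prod.fst).Nodup) &&
  (!(cast.all (fun p => p.2.isSome) &&
     scheduled_actors.all (fun a => (cast.map Prod.snd).contains (some a))) ||
   cast.all (fun p => pvScorable rc rs p.1 p.2.toList)) &&
  cast.all (fun p =>
    !(p.2 == none && cast.all (fun q => !(q.2 == none) || pvStrLe p.1 q.1)) ||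
    ((role_actor.map Prod.fst).contains p.1 &&
     (rc.map Prod.fst).contains p.1 &&   -- A reads the convenience table before the loop
     (pvGetD role_actor p.1 [] == [] ||
      (cast.all (fun q => (role_actor.map Prod.fst).contains q.1 &&
         (rc.map Prod.fst).contains q.1 && (rs.map Prod.fst).contains q.1) &&
       cast.all (fun q => pvScorable rc rs q.1 q.2.toList &&
         pvScorable rc rs q.1 (pvGetD role_actor q.1 []))))))

-- Pre_ excludes (a) duplicate dict keys, which a Python dict cannot represent, and
-- (b) inputs whose tables are missing entries the search can look up, on which A raises
-- KeyError.  Whether a missing DEEP entry is actually reached depends on run-time pruning,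
-- so clause (b) is necessarily conservative: on the rare excluded inputs where pruning
-- stops before the missing entry, A returns and B returns the very same value (see
-- claim.json "cites").  The equivalence proof below uses ONLY the unique-key clauses —
-- the completeness clause is not there to ease the proof, but solely so that the
-- behavioural test never drives Python A into a KeyError inside Pre_.
def Pre_GeneratePossibleCasts (cast : List (String × Option String)) (role_actor : List (String × List String)) (scheduled_actors : List String) (best_score : Int) (role_actor_convenience : List (String × List (String × Int))) (role_actor_skill : List (String × List (String × Int))) : Prop :=
  (cast.map Prod.fst).Nodup ∧
  pvPreChk cast role_actor scheduled_actors role_actor_convenience role_actor_skill = true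
instance (cast : List (String × Option String)) (role_actor : List (String × List String)) (scheduled_actors : List String) (best_score : Int) (role_actor_convenience : List (String × List (String × Int))) (role_actor_skill : List (String × List (String × Int))) : Decidable (Pre_GeneratePossibleCasts cast role_actor scheduled_actors best_score role_actor_convenience role_actor_skill) := by unfold Pre_GeneratePossibleCasts; infer_instance
def pvWitness_GeneratePossibleCasts : (List (String × Option String)) × (List (String × List String)) × List String × Int × (List (String × List (String × Int))) × (List (String × List (String × Int))) :=
  ([("r", none)], [("r", ["x"])], [], 0, [("r", [("x", 2)])], [("r", [("x", 3)])])
def Spec_GeneratePossibleCasts (cast : List (String × Option String)) (role_actor : List (String × List String)) (scheduled_actors : List String) (best_score : Int) (role_actor_convenience : List (String × List (String × Int))) (role_actor_skill : List (String × List (String × Int))) (out : (List (List (String × Option String))) × Int) : Prop := out = GeneratePossibleCasts_alt cast role_actor scheduled_actors best_score role_actor_convenience role_actor_skill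
instance (cast : List (String × Option String)) (role_actor : List (String × List String)) (scheduled_actors : List String) (best_score : Int) (role_actor_convenience : List (String × List (String × Int))) (role_actor_skill : List (String × List (String × Int))) (out : (List (List (String × Option String))) × Int) : Decidable (Spec_GeneratePossibleCasts cast role_actor scheduled_actors best_score role_actor_convenience role_actor_skill out) := by unfold Spec_GeneratePossibleCasts; infer_instance

-- ===== CLAIM (what is proved, stated in full; the proofs are below) =====
def Claim_equal_GeneratePossibleCasts : Prop := ∀ (cast : List (String × Option String)) (role_actor : List (String × List String)) (scheduled_actors : List String) (best_score : Int) (role_actor_convenience : List (String × List (String × Int))) (role_actor_skill : List (String × List (String × Int))), Dom_GeneratePossibleCasts cast role_actor scheduled_actors best_score role_actor_convenience role_actor_skill → Pre_GeneratePossibleCasts cast role_actor scheduled_actors best_score role_actor_convenience role_actor_skill → Spec_GeneratePossibleCasts cast role_actor scheduled_actors best_score role_actor_convenience role_actor_skill (GeneratePossibleCasts cast role_actor scheduled_actors best_score role_actor_convenience role_actor_skill)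

-- ===== LEMMAS AND PROOFS =====

-- dict lookup of an entry's own key (unique keys)
theorem pvGetD_entry {ν : Type} (c : List (String × ν)) (p : String × ν) (v0 : ν)
    (hnd : (c.map Prod.fst).Nodup) (hp : p ∈ c) : pvGetD c p.1 v0 = p.2 := by
  unfold pvGetD
  exact PySem.Dict.getD_of_mem_items (PySem.Dict.mk c) (by simpa using hp)
    (by simpa using hnd) v0

theorem pvInsert_nodup (c : List (String × Option String)) (k : String) (v : Option String)
    (hnd : (c.map Prod.fst).Nodup) : ((pvInsertD c k v).map Prod.fst).Nodup := by
  unfold pvInsertD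
  simpa using PySem.Dict.nodup_keys_insert (d := PySem.Dict.mk c) (k := k) (v := v)
    (by simpa using hnd)

-- the two scoring helpers agree on unique-key casts
theorem pvScoreFold (conv skill : List (String × List (String × Int)))
    (l : List (String × Option String)) (s : Int) (e : Bool) :
    l.foldl (fun (st : Int × Bool) p => match p.2 with
      | none => st
      | some actor => (st.1 * (pvTbl2 conv p.1 actor * pvTbl2 skill p.1 actor), false)) (s, e)
    = ((l.filterMap (fun p => p.2.map (fun a => (p.1, a)))).foldl
         (fun s q => s * (pvTbl2 conv q.1 q.2 * pvTbl2 skill q.1 q.2)) s,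
       e && (l.filterMap (fun p => p.2.map (fun a => (p.1, a)))).isEmpty) := by
  induction l generalizing s e with
  | nil => simp
  | cons p t ih => cases hp : p.2 <;> simp [hp, ih]

theorem pvScore_eq (c : List (String × Option String))
    (conv skill : List (String × List (String × Int)))
    (hnd : (c.map Prod.fst).Nodup) : scoreCastA c conv skill = scoreB c conv skill := by
  simp only [scoreCastA, scoreB]
  have hcongr : c.foldl (fun (st : Int × Bool) p =>
      match pvGetD c p.1 none with
      | none => st
      | some actor => (st.1 * (pvTbl2 conv p.1 actor * pvTbl2 skill p.1 actor), false)) (1, true)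
      = c.foldl (fun (st : Int × Bool) p =>
      match p.2 with
      | none => st
      | some actor => (st.1 * (pvTbl2 conv p.1 actor * pvTbl2 skill p.1 actor), false)) (1, true) :=
    PySem.List.foldl_congr_mem _ _ _ _
      (fun acc x hx => by rw [pvGetD_entry c x none hnd hx])
  rw [hcongr, pvScoreFold]
  cases he : (c.filterMap (fun p => p.2.map (fun a => (p.1, a)))).isEmpty <;> simp [he]

-- the two empty-role collectors agree on unique-key casts
theorem pvEmpties (c : List (String × Option String)) (hnd : (c.map Prod.fst).Nodup) :
    c.foldl (fun (acc : List String) p => match pvGetD c p.1 none with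
      | none => acc ++ [p.1]
      | some _ => acc) []
    = (c.filter (fun p => p.2 == none)).map Prod.fst := by
  have hcongr : c.foldl (fun (acc : List String) p =>
      match pvGetD c p.1 none with
      | none => acc ++ [p.1]
      | some _ => acc) []
      = c.foldl (fun (acc : List String) p =>
      if p.2 == none then acc ++ [p.1] else acc) [] :=
    PySem.List.foldl_congr_mem _ _ _ _
      (fun acc x hx => by rw [pvGetD_entry c x none hnd hx]; cases hx2 : x.2 <;> simp)
  rw [hcongr]
  simpa using PySem.List.foldl_append_if (p := fun p : String × Option String => p.2 == none)
    (f := Prod.fst) (l := c) (acc := [])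

theorem pvFilterMapEmpties (c : List (String × Option String)) :
    c.filterMap (fun p => if p.2 == none then some p.1 else none)
    = (c.filter (fun p => p.2 == none)).map Prod.fst := by
  induction c with
  | nil => simp
  | cons p t ih => cases hp : p.2 <;> simp_all

theorem pvHeadSorted_min (xs : List String) :
    (PySem.List.sorted xs (fun r => r) false).head? = PySem.List.min? xs (fun r => r) := by
  cases hxs : PySem.List.sorted xs (fun r => r) false with
  | nil =>
    have hx0 : xs = [] := (PySem.List.sorted_eq_nil_iff _ _ _).mp hxs
    subst hx0
    rfl
  | cons m t =>
    have hxsne : xs ≠ [] := by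
      intro h; subst h
      have : (m :: t : List String) = [] := by
        rw [← hxs]; exact (PySem.List.sorted_eq_nil_iff _ _ _).mpr rfl
      cases this
    obtain ⟨m', hm'⟩ : ∃ m', PySem.List.min? xs (fun r => r) = some m' := by
      cases h : PySem.List.min? xs (fun r => r) with
      | none => exact absurd ((PySem.List.min?_eq_none_iff _ _).mp h) hxsne
      | some y => exact ⟨y, rfl⟩
    have hmem : m ∈ xs := by
      have : m ∈ PySem.List.sorted xs (fun r => r) false := by rw [hxs]; exact List.mem_cons_self
      exact (PySem.List.mem_sorted _ _ _ _).mp this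
    have h1 : ∀ y ∈ xs, m ≤ y := fun y hy => by
      simpa using PySem.List.key_head_sorted_le xs (fun r => r) hxs y hy
    have h2 : ∀ y ∈ xs, m' ≤ y := fun y hy => by
      simpa using PySem.List.min?_isMin hm' y hy
    have hm'mem : m' ∈ xs := PySem.List.min?_mem hm'
    rw [hm']
    simp [le_antisymm (h1 m' hm'mem) (h2 m hmem)]

theorem pvNext_eq (c : List (String × Option String)) (hnd : (c.map Prod.fst).Nodup) :
    nextUnfilledRoleA c = nextRoleB c := by
  simp only [nextUnfilledRoleA, nextRoleB]
  rw [pvEmpties c hnd, pvFilterMapEmpties, pvHeadSorted_min]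

-- the two required-actor checks agree
theorem pvRequired_eq (c : List (String × Option String)) (sched : List String) :
    castHasRequiredA c sched = castHasRequiredB c sched := by
  unfold castHasRequiredA castHasRequiredB
  have h1 : ∀ (b : Bool) (l : List String), l.foldl (fun ok actor =>
      if (PySem.Dict.mk c).values.contains (some actor) then ok else false) b
      = (b && l.all (fun a => (PySem.Dict.mk c).values.contains (some a))) := by
    intro b l
    induction l generalizing b with
    | nil => simp
    | cons a t ih =>
      simp only [List.foldl_cons, List.all_cons]
      rw [ih]
      cases hv : (PySem.Dict.mk c).values.contains (some a) <;> simp [hv]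
  simpa using h1 true sched

-- the two purge helpers agree
theorem pvDropFirst_eq (l : List String) (x : String) :
    dropFirstB l x = (match PySem.List.remove? l x with
      | some l' => l'
      | none => l) := by
  unfold dropFirstB
  by_cases hx : x ∈ l
  · obtain ⟨i, hi⟩ : ∃ i, PySem.List.index? l x = some i :=
      Option.isSome_iff_exists.mp ((PySem.List.index?_isSome_iff _ _).mpr hx)
    obtain ⟨pre, suf, hl, hlen, hxpre⟩ := (PySem.List.index?_eq_some_iff _ _ _).mp hi
    subst hl
    rw [PySem.List.remove?_eq_some_erase _ _ hx, hi]

    simp only [List.elem_eq_contains] at *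
    rw [if_pos (by simpa using hx)]
    subst hlen
    have hc : ((pre.length : Int) + 1) = ((pre.length + 1 : Nat) : Int) := by push_cast; ring
    rw [hc, PySem.List.slice_to_natCast, PySem.List.slice_from_natCast]
    rw [List.take_left]
    have hd : (pre ++ x :: suf).drop (pre.length + 1) = suf := by
      have : pre ++ x :: suf = (pre ++ [x]) ++ suf := by simp
      rw [this]
      have h2 : pre.length + 1 = (pre ++ [x]).length := by simp
      rw [h2, List.drop_left]
    rw [hd]
    rw [List.erase_append_right _ (by simpa using hxpre), List.erase_cons_head]
  · rw [if_neg (by simpa using hx), (PySem.List.remove?_eq_none_iff _ _).mpr hx]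

theorem pvPurge_eq (ra : List (String × List String)) (a : String) :
    copyPurgingActorA ra a = purgeB ra a := by
  unfold copyPurgingActorA purgeB
  apply List.map_congr_left
  intro p _
  rw [pvDropFirst_eq]

-- the next unfilled role is an unfilled key
theorem pvNext_unfilled (c : List (String × Option String)) (r : String)
    (hnd : (c.map Prod.fst).Nodup) (h : nextUnfilledRoleA c = some r) :
    PySem.Dict.get? (PySem.Dict.mk c) r = some none := by
  simp only [nextUnfilledRoleA] at h
  rw [pvEmpties c hnd] at h
  have hmem : r ∈ (c.filter (fun p => p.2 == none)).map Prod.fst := by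
    have h1 : r ∈ PySem.List.sorted ((c.filter (fun p => p.2 == none)).map Prod.fst)
        (fun r => r) false := by
      cases hs : PySem.List.sorted ((c.filter (fun p => p.2 == none)).map Prod.fst)
          (fun r => r) false with
      | nil => rw [hs] at h; simp at h
      | cons y t => rw [hs] at h; simp at h; subst h; exact List.mem_cons_self
    exact (PySem.List.mem_sorted _ _ _ _).mp h1
  obtain ⟨p, hpmem, hp1⟩ := List.mem_map.mp hmem
  have hpc : p ∈ c := List.mem_of_mem_filter hpmem
  have hp2 : p.2 = none := by
    have := List.of_mem_filter hpmem
    simpa using this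
  have : (r, (none : Option String)) ∈ c := by
    have : p = (r, none) := by
      cases p; simp_all
    rw [← this]; exact hpc
  exact PySem.Dict.get?_of_mem_items (d := PySem.Dict.mk c) this (by simpa using hnd)

-- filling an unfilled role strictly decreases the unfilled count
theorem pvCountPLt {α : Type} (l : List α) (f g : α → Bool)
    (hle : ∀ x ∈ l, g x = true → f x = true) (x0 : α) (hx0 : x0 ∈ l)
    (hf : f x0 = true) (hg : g x0 = false) : l.countP g < l.countP f := by
  induction l with
  | nil => simp at hx0
  | cons y t ih =>
    have hlet : ∀ x ∈ t, g x = true → f x = true := fun x hx => hle x (List.mem_cons_of_mem _ hx)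
    have hmono : t.countP g ≤ t.countP f := List.countP_mono_left hlet
    rcases List.mem_cons.mp hx0 with h | h
    · subst h
      have e1 : (x0 :: t).countP g = t.countP g := by
        rw [List.countP_cons, hg]; simp
      have e2 : (x0 :: t).countP f = t.countP f + 1 := by
        rw [List.countP_cons, hf]; simp
      omega
    · have hih := ih hlet h
      by_cases hgy : g y = true
      · have hfy := hle y List.mem_cons_self hgy
        have e3 : (y :: t).countP g = t.countP g + 1 := by rw [List.countP_cons, hgy]; simp
        have e4 : (y :: t).countP f = t.countP f + 1 := by rw [List.countP_cons, hfy]; simp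
        omega
      · have e3 : (y :: t).countP g = t.countP g := by
          simp only [Bool.not_eq_true] at hgy
          rw [List.countP_cons, hgy]; simp
        have e4 : t.countP f ≤ (y :: t).countP f := by
          rw [List.countP_cons]; omega
        omega

theorem pvInsert_noneCount (c : List (String × Option String)) (role a : String)
    (hr : PySem.Dict.get? (PySem.Dict.mk c) role = some none) :
    pvNoneCount (pvInsertD c role (some a)) < pvNoneCount c := by
  unfold pvInsertD pvNoneCount
  have hcont : (PySem.Dict.mk c).contains role = true := by
    rw [PySem.Dict.contains_eq_isSome_get?, hr]; rfl
  rw [PySem.Dict.items_insert_of_contains (PySem.Dict.mk c) (some a) hcont]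
  have hitems : (PySem.Dict.mk c).items = c := rfl
  rw [hitems, List.countP_map]
  have hwit : (role, (none : Option String)) ∈ c :=
    by simpa using PySem.Dict.mem_items_of_get?_eq_some _ hr
  apply pvCountPLt c _ _ ?hle (role, none) hwit (by simp) ?hg
  · intro x hx hgx
    simp only [Function.comp] at hgx ⊢
    by_cases hx1 : x.1 == role
    · simp [hx1] at hgx
    · simpa [hx1] using hgx
  · simp [Function.comp]

-- loopA with an accumulator is loopA from [] appended
theorem pvLoopA_acc (actors : List String) (role : String)
    (cast : List (String × Option String)) (role_actor : List (String × List String))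
    (sched : List String) (conv skill : List (String × List (String × Int))) :
    ∀ (best : Int) (acc : List (List (String × Option String))),
    loopA actors role cast role_actor sched best conv skill acc
    = (acc ++ (loopA actors role cast role_actor sched best conv skill []).1,
       (loopA actors role cast role_actor sched best conv skill []).2) := by
  induction actors with
  | nil => intro best acc; simp [loopA]
  | cons a rest ih =>
    intro best acc
    rw [loopA, loopA]
    by_cases h1 : scoreCastA (pvInsertD cast role (some a)) conv skill < best
    · simp only [if_pos h1]
      exact ih best acc
    · simp only [if_neg h1]
      by_cases h2 : pvNoneCount (pvInsertD cast role (some a)) < pvNoneCount cast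
      · simp only [dif_pos h2]
        rw [ih _ (acc ++ _), ih _ ([] ++ _)]
        simp
      · simp only [dif_neg h2]
        exact ih best acc

-- the returned best never drops below the incoming one
theorem pvLoopA_mono (actors : List String) (role : String)
    (cast : List (String × Option String)) (role_actor : List (String × List String))
    (sched : List String) (conv skill : List (String × List (String × Int))) :
    ∀ (best : Int) (acc : List (List (String × Option String))),
    best ≤ (loopA actors role cast role_actor sched best conv skill acc).2 := by
  induction actors with
  | nil => intro best acc; simp [loopA]
  | cons a rest ih =>
    intro best acc
    rw [loopA]
    by_cases h1 : scoreCastA (pvInsertD cast role (some a)) conv skill < best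
    · simp only [if_pos h1]; exact ih best acc
    · simp only [if_neg h1]
      by_cases h2 : pvNoneCount (pvInsertD cast role (some a)) < pvNoneCount cast
      · simp only [dif_pos h2]
        exact le_trans (le_max_left _ _) (ih _ _)
      · simp only [dif_neg h2]; exact ih best acc

-- the recursion, frame by frame: what the machine must compute for each stacked frame
def processA (sched : List String) (conv skill : List (String × List (String × Int))) :
    List (String × List String × List (String × Option String) × List (String × List String)) →
    List (List (String × Option String)) → Int → (List (List (String × Option String))) × Int
  | [], acc, best => (acc, best)
  | (role, actors, c, ra) :: rest, acc, best =>
    let r := loopA actors role c ra sched best conv skill acc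
    processA sched conv skill rest r.1 r.2

-- machine-stack invariant: unique keys, bounded candidate lists, the frame role unfilled
def pvInv (L : Nat)
    (fr : String × List String × List (String × Option String) × List (String × List String)) :
    Prop :=
  (fr.2.2.1.map Prod.fst).Nodup ∧ (∀ p ∈ fr.2.2.2, p.2.length + 2 ≤ L) ∧
  PySem.Dict.get? (PySem.Dict.mk fr.2.2.1) fr.1 = some none

theorem pvDropFirst_len (l : List String) (x : String) :
    (dropFirstB l x).length ≤ l.length := by
  rw [pvDropFirst_eq]
  cases h : PySem.List.remove? l x with
  | none => simp
  | some l' =>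
    have hx : x ∈ l := by
      by_contra hx
      rw [(PySem.List.remove?_eq_none_iff _ _).mpr hx] at h; cases h
    rw [PySem.List.remove?_eq_some_erase _ _ hx] at h
    cases h
    rw [List.length_erase]
    simp only [hx, if_pos]
    omega

theorem pvPurge_len (ra : List (String × List String)) (a : String) (L : Nat)
    (hb : ∀ p ∈ ra, p.2.length + 2 ≤ L) : ∀ p ∈ purgeB ra a, p.2.length + 2 ≤ L := by
  intro p hp
  obtain ⟨q, hq, rfl⟩ := List.mem_map.mp hp
  have := pvDropFirst_len q.2 a
  have := hb q hq
  simp only []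
  omega

theorem pvGetD_len_bound (ra : List (String × List String)) (r : String) (L : Nat) (hL : 2 ≤ L)
    (hb : ∀ p ∈ ra, p.2.length + 2 ≤ L) : (pvGetD ra r []).length + 2 ≤ L := by
  unfold pvGetD
  rw [PySem.Dict.getD_eq_get?_getD]
  cases hg : PySem.Dict.get? (PySem.Dict.mk ra) r with
  | none => simpa using hL
  | some v =>
    have : (r, v) ∈ ra := by simpa using PySem.Dict.mem_items_of_get?_eq_some _ hg
    simpa using hb _ this

theorem pvFoldlMaxLe (l : List (String × List String)) :
    ∀ (i : Nat), i ≤ l.foldl (fun m q => max m q.2.length) i := by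
  induction l with
  | nil => intro i; simp
  | cons u s ih =>
    intro i
    simp only [List.foldl_cons]
    exact le_trans (le_max_left _ _) (ih _)

theorem pvFoldlMaxLen (ra : List (String × List String)) :
    ∀ (init : Nat) (p : String × List String), p ∈ ra →
      p.2.length ≤ ra.foldl (fun m q => max m q.2.length) init := by
  induction ra with
  | nil => intro _ _ h; simp at h
  | cons q t ih =>
    intro init p hp
    rcases List.mem_cons.mp hp with h | h
    · subst h
      simp only [List.foldl_cons]
      exact le_trans (le_max_right init p.2.length) (pvFoldlMaxLe t _)
    · exact ih _ p h

-- MAIN: the DFS machine computes, stack frame by stack frame, exactly what A's recursion does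
theorem pvRun_eq (sched : List String) (conv skill : List (String × List (String × Int)))
    (L : Nat) (hL : 2 ≤ L) :
    ∀ (w : Nat)
      (st : List (String × List String × List (String × Option String) × List (String × List String)))
      (acc : List (List (String × Option String))) (best : Int),
      stackWeightB L st ≤ w → (∀ fr ∈ st, pvInv L fr) →
      runB sched conv skill L st acc best = processA sched conv skill st acc best := by
  intro w
  induction w with
  | zero =>
    intro st acc best hw hinv
    cases st with
    | nil => simp [runB, processA]
    | cons fr rest =>
      exfalso
      have h1 : 0 < (max L 2) ^ (pvNoneCount fr.2.2.1) := Nat.pow_pos (by omega)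
      have h2 : 0 < frameWeightB L fr := by
        unfold frameWeightB
        positivity
      have h3 : stackWeightB L (fr :: rest) = frameWeightB L fr + stackWeightB L rest := by
        simp [stackWeightB]
      omega
  | succ w ih =>
    intro st acc best hw hinv
    cases st with
    | nil => simp [runB, processA]
    | cons fr rest =>
      obtain ⟨role, actors, c, ra⟩ := fr
      obtain ⟨hnd, hb, hrole⟩ := hinv _ List.mem_cons_self
      have hinv' : ∀ f ∈ rest, pvInv L f := fun f hf => hinv _ (List.mem_cons_of_mem _ hf)
      have hbpos : 0 < (max L 2) ^ (pvNoneCount c) := Nat.pow_pos (by omega)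
      cases actors with
      | nil =>
        have hwr : stackWeightB L rest ≤ w := by
          have h3 : stackWeightB L ((role, [], c, ra) :: rest)
              = frameWeightB L (role, [], c, ra) + stackWeightB L rest := by simp [stackWeightB]
          have h2 : 0 < frameWeightB L (role, [], c, ra) := by unfold frameWeightB; positivity
          omega
        simp only [runB, processA, loopA]
        exact ih rest acc best hwr hinv'
      | cons a tl =>
        have hndc : ((pvInsertD c role (some a)).map Prod.fst).Nodup :=
          pvInsert_nodup c role (some a) hnd
        have hdec : pvNoneCount (pvInsertD c role (some a)) < pvNoneCount c :=
          pvInsert_noneCount c role a hrole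
        have hsc : scoreCastA (pvInsertD c role (some a)) conv skill
            = scoreB (pvInsertD c role (some a)) conv skill := pvScore_eq _ _ _ hndc
        have hinvtl : ∀ f ∈ (role, tl, c, ra) :: rest, pvInv L f := by
          intro f hf
          rcases List.mem_cons.mp hf with h | h
          · subst h; exact ⟨hnd, hb, hrole⟩
          · exact hinv' _ h
        have hwtl : stackWeightB L ((role, tl, c, ra) :: rest) ≤ w := by
          simp only [stackWeightB, frameWeightB, List.map_cons, List.sum_cons,
            List.length_cons] at hw ⊢
          have he : (tl.length + 1 + 1) * (max L 2) ^ (pvNoneCount c)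
              = (tl.length + 1) * (max L 2) ^ (pvNoneCount c) + (max L 2) ^ (pvNoneCount c) := by
            ring
          omega
        by_cases hs : scoreB (pvInsertD c role (some a)) conv skill < best
        · -- pruned child
          rw [show runB sched conv skill L ((role, a :: tl, c, ra) :: rest) acc best
              = runB sched conv skill L ((role, tl, c, ra) :: rest) acc best by
            simp only [runB, if_pos hs]]
          rw [ih _ acc best hwtl hinvtl]
          simp only [processA, loopA, hsc, if_pos hs]
        · -- the child survives pruning
          cases hn : nextRoleB (pvInsertD c role (some a)) with
          | none =>
            -- child cast is full: recorded (or not) inline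
            have hchA : GeneratePossibleCasts (pvInsertD c role (some a))
                (copyPurgingActorA ra a) sched best conv skill
                = (if castHasRequiredB (pvInsertD c role (some a)) sched then
                     ([pvInsertD c role (some a)],
                      max best (scoreB (pvInsertD c role (some a)) conv skill))
                   else ([], best)) := by
              rw [GeneratePossibleCasts]
              rw [pvNext_eq _ hndc, hn, pvRequired_eq, hsc]
            by_cases hreq : castHasRequiredB (pvInsertD c role (some a)) sched
            · rw [show runB sched conv skill L ((role, a :: tl, c, ra) :: rest) acc best
                  = runB sched conv skill L ((role, tl, c, ra) :: rest)
                      (acc ++ [pvInsertD c role (some a)])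
                      (max best (scoreB (pvInsertD c role (some a)) conv skill)) by
                simp only [runB, if_neg hs, hn, if_pos hreq]]
              rw [ih _ _ _ hwtl hinvtl]
              simp only [processA, loopA, hsc, if_neg hs, dif_pos hdec]
              rw [hchA, if_pos hreq]
              simp [max_assoc]
            · rw [show runB sched conv skill L ((role, a :: tl, c, ra) :: rest) acc best
                  = runB sched conv skill L ((role, tl, c, ra) :: rest) acc best by
                simp only [runB, if_neg hs, hn, if_neg hreq]]
              rw [ih _ _ _ hwtl hinvtl]
              simp only [processA, loopA, hsc, if_neg hs, dif_pos hdec]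
              rw [hchA, if_neg hreq]
              simp
          | some r' =>
            -- child has an unfilled role: push its frame
            have hpe : purgeB ra a = copyPurgingActorA ra a := (pvPurge_eq ra a).symm
            have hra' : ∀ p ∈ purgeB ra a, p.2.length + 2 ≤ L := pvPurge_len ra a L hb
            have hlen : (orderedB conv r' (pvGetD (purgeB ra a) r' [])).length + 2 ≤ L := by
              unfold orderedB
              rw [PySem.List.length_sorted]
              exact pvGetD_len_bound _ r' L hL hra'
            have hg : pvNoneCount (pvInsertD c role (some a)) < pvNoneCount c ∧
                (orderedB conv r' (pvGetD (purgeB ra a) r' [])).length + 2 ≤ L := ⟨hdec, hlen⟩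
            have hr'un : PySem.Dict.get? (PySem.Dict.mk (pvInsertD c role (some a))) r'
                = some none := by
              apply pvNext_unfilled _ _ hndc
              rw [pvNext_eq _ hndc, hn]
            have hinvnew : ∀ f ∈ (r', orderedB conv r' (pvGetD (purgeB ra a) r' []),
                pvInsertD c role (some a), purgeB ra a) :: (role, tl, c, ra) :: rest,
                pvInv L f := by
              intro f hf
              rcases List.mem_cons.mp hf with h | h
              · subst h; exact ⟨hndc, hra', hr'un⟩
              · exact hinvtl _ h
            have hwnew : stackWeightB L ((r', orderedB conv r' (pvGetD (purgeB ra a) r' []),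
                pvInsertD c role (some a), purgeB ra a) :: (role, tl, c, ra) :: rest) ≤ w := by
              simp only [stackWeightB, frameWeightB, List.map_cons, List.sum_cons,
                List.length_cons] at hw ⊢
              have he : (tl.length + 1 + 1) * (max L 2) ^ (pvNoneCount c)
                  = (tl.length + 1) * (max L 2) ^ (pvNoneCount c)
                    + (max L 2) ^ (pvNoneCount c) := by ring
              have h3 : ((orderedB conv r' (pvGetD (purgeB ra a) r' [])).length + 1) *
                  (max L 2) ^ (pvNoneCount (pvInsertD c role (some a)))
                  < (max L 2) ^ (pvNoneCount c) :=
                pvChildLt (max L 2) _ _ _ (by omega) hdec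
                  (le_trans hlen (Nat.le_max_left L 2))
              omega
            rw [show runB sched conv skill L ((role, a :: tl, c, ra) :: rest) acc best
                = runB sched conv skill L ((r', orderedB conv r' (pvGetD (purgeB ra a) r' []),
                    pvInsertD c role (some a), purgeB ra a) :: (role, tl, c, ra) :: rest)
                    acc best by
              simp only [runB, if_neg hs, hn, dif_pos hg]]
            rw [ih _ acc best hwnew hinvnew]
            -- both sides are processA now; unfold the child frame on the left
            simp only [processA]
            -- A-side: unfold the recursive call
            have hch : GeneratePossibleCasts (pvInsertD c role (some a))
                (copyPurgingActorA ra a) sched best conv skill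
                = loopA (orderedB conv r' (pvGetD (purgeB ra a) r' [])) r'
                    (pvInsertD c role (some a)) (copyPurgingActorA ra a)
                    sched best conv skill [] := by
              rw [GeneratePossibleCasts]
              rw [pvNext_eq _ hndc, hn]
              simp only [orderedB, hpe]
            simp only [loopA, hsc, if_neg hs, dif_pos hdec]
            rw [hch, hpe]
            rw [pvLoopA_acc _ _ _ _ _ _ _ _ acc]
            have hmono : best ≤ (loopA (orderedB conv r' (pvGetD (copyPurgingActorA ra a) r' []))
                r' (pvInsertD c role (some a)) (copyPurgingActorA ra a)
                sched best conv skill []).2 := pvLoopA_mono _ _ _ _ _ _ _ _ _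
            rw [max_eq_right hmono]

-- ===== VERDICT (by name: the statement is the Claim_ definition above) =====
theorem GeneratePossibleCasts_spec : Claim_equal_GeneratePossibleCasts := by
  intro cast role_actor sched best conv skill hdom hpre
  unfold Spec_GeneratePossibleCasts
  obtain ⟨hnd, -⟩ := hpre
  simp only [GeneratePossibleCasts_alt, GeneratePossibleCasts]
  rw [pvNext_eq _ hnd]
  cases hn : nextRoleB cast with
  | none =>
    simp only [hn]
    rw [pvRequired_eq, pvScore_eq _ _ _ hnd]
  | some r =>
    simp only [hn]
    have hL : 2 ≤ role_actor.foldl (fun m q => max m q.2.length) 0 + 2 := by omega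
    have hbound : ∀ p ∈ role_actor,
        p.2.length + 2 ≤ role_actor.foldl (fun m q => max m q.2.length) 0 + 2 := by
      intro p hp
      have := pvFoldlMaxLen role_actor 0 p hp
      omega
    have hrun := pvRun_eq sched conv skill
      (role_actor.foldl (fun m q => max m q.2.length) 0 + 2) hL
      (stackWeightB (role_actor.foldl (fun m q => max m q.2.length) 0 + 2)
        [(r, orderedB conv r (pvGetD role_actor r []), cast, role_actor)])
      [(r, orderedB conv r (pvGetD role_actor r []), cast, role_actor)] [] best
      (le_refl _) ?hinv
    case hinv =>
      intro f hf
      rcases List.mem_cons.mp hf with h | h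
      · subst h
        refine ⟨hnd, hbound, ?_⟩
        apply pvNext_unfilled _ _ hnd
        rw [pvNext_eq _ hnd, hn]
      · simp at h
    rw [hrun]
    simp only [processA, orderedB]
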